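-- pv_equiv track=rewrite | github.com/akashvshroff/Data_Structures_Basic | dir_reduction.py | directions_reduction
-- ===== SOURCE A (Python) =====
-- def directions_reduction(dirs: list) -> list:
--     """
--     Given a list of cardinal directions (North,South,East,West), return the
--     directions but simplified as going north at one point and then going south
--     right after would be redundant.
--     For example:
--     dirs = ["NORTH", "SOUTH", "SOUTH", "EAST", "WEST", "NORTH", "WEST"]
--     directions_reduction(dirs)
--     >>> ["WEST"]
--     This is because the first North and South cancel each other. Then the East
--     and West cancel and then the South at the third index meets North at the
--     second last index and cancel out leaving only west.
--     See also:
--     https://www.codewars.com/kata/550f22f4d758534c1100025a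
--     """
--     DIR_LIST = {
--         'NORTH': 'SOUTH',
--         'SOUTH': 'NORTH',
--         'EAST': 'WEST',
--         'WEST': 'EAST'
--     }
--     if not dirs:
--         return []
--     final_dirs = [dirs[0]]  # this question can be easily solved with a stack.
--     for dir in dirs[1:]:
--         if final_dirs and dir == DIR_LIST[final_dirs[-1]]:
--             final_dirs.pop()
--         else:
--             final_dirs.append(dir)
--     return final_dirs
-- ===== SOURCE B (Python) =====
-- def directions_reduction(dirs: list) -> list:
--     """Divide-and-conquer: reduce each half, then cancel across the junction."""
--     DIR_LIST = {
--         'NORTH': 'SOUTH',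
--         'SOUTH': 'NORTH',
--         'EAST': 'WEST',
--         'WEST': 'EAST'
--     }
--
--     def merge(left, right):
--         i = 0
--         while left and i < len(right) and right[i] == DIR_LIST[left[-1]]:
--             left.pop()
--             i += 1
--         return left + right[i:]
--
--     def go(chunk):
--         if len(chunk) <= 1:
--             return list(chunk)
--         mid = len(chunk) // 2
--         return merge(go(chunk[:mid]), go(chunk[mid:]))
--
--     return go(dirs)
-- ===== Notes on version B (the rewrite author's own statement) =====
-- stated objective: alternative
-- what changed: Replaced the single left-to-right stack pass by a divide-and-conquer reduction: each half of the list is reduced recursively and the two reduced halves are merged by cancelling opposing directions across the junction.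
import Mathlib
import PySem

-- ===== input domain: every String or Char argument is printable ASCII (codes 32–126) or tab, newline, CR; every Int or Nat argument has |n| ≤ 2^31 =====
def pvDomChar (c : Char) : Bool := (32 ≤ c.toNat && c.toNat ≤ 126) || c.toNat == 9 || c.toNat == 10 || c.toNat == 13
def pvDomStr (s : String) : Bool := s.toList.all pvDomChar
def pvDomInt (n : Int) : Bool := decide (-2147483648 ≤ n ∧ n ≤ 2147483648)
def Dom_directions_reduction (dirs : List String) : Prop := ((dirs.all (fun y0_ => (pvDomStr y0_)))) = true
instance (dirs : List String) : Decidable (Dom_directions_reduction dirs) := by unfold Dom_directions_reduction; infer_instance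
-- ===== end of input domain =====

-- B reduces by divide-and-conquer (reduce halves, cancel across the junction) instead of A's
-- single left-to-right stack pass; same values wherever A returns, no speed claim.

-- ===== PORT A =====
-- DIR_LIST, shared by both ports (both Pythons define the same literal dict)
def pvDIR : PySem.Dict String String :=
  PySem.Dict.ofList [("NORTH", "SOUTH"), ("SOUTH", "NORTH"), ("EAST", "WEST"), ("WEST", "EAST")]

-- the loop body: `if final_dirs and dir == DIR_LIST[final_dirs[-1]]: pop else append`.
-- DIR_LIST[…] is ported as getD with default "": under Pre_ the consulted key is always present.
def pvStep (final_dirs : List String) (dir : String) : List String :=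
  match final_dirs.getLast? with
  | some t => if dir = pvDIR.getD t "" then final_dirs.dropLast else final_dirs ++ [dir]
  | none => final_dirs ++ [dir]

def directions_reduction (dirs : List String) : List String :=
  match dirs with
  | [] => []
  | d0 :: rest => rest.foldl pvStep [d0]

-- ===== PORT B =====
-- merge(left, right): pop cancelling pairs across the junction, then concatenate.
def pvMerge (left : List String) (right : List String) : List String :=
  match left.getLast?, right with
  | some t, r0 :: rs =>
      if r0 = pvDIR.getD t "" then pvMerge left.dropLast rs else left ++ (r0 :: rs)
  | _, _ => left ++ right
termination_by right.length
decreasing_by simp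

-- go(chunk): chunks of length ≤ 1 are already reduced; otherwise split at mid and merge.
-- chunk[:mid] / chunk[mid:] with 0 ≤ mid ≤ len are exactly take/drop.
def pvGo (chunk : List String) : List String :=
  if h : chunk.length ≤ 1 then chunk
  else
    pvMerge (pvGo (chunk.take (chunk.length / 2))) (pvGo (chunk.drop (chunk.length / 2)))
termination_by chunk.length
decreasing_by
  · simp; omega
  · simp; omega

def directions_reduction_alt (dirs : List String) : List String := pvGo dirs

-- ===== PRECONDITION & SPEC =====
-- Pre_ excludes exactly the inputs on which A raises KeyError: a token other than the four
-- directions anywhere except the last position is eventually consulted as DIR_LIST[stack top].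
def Pre_directions_reduction (dirs : List String) : Prop :=
  ∀ d ∈ dirs.dropLast, d = "NORTH" ∨ d = "SOUTH" ∨ d = "EAST" ∨ d = "WEST"
instance (dirs : List String) : Decidable (Pre_directions_reduction dirs) := by
  unfold Pre_directions_reduction; infer_instance

def pvWitness_directions_reduction : List String :=
  ["NORTH", "SOUTH", "SOUTH", "EAST", "WEST", "NORTH", "WEST"]

def Spec_directions_reduction (dirs : List String) (out : List String) : Prop := out = directions_reduction_alt dirs
instance (dirs : List String) (out : List String) : Decidable (Spec_directions_reduction dirs out) := by unfold Spec_directions_reduction; infer_instance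

-- ===== CLAIM (what is proved, stated in full; the proofs are below) =====
def Claim_equal_directions_reduction : Prop := ∀ (dirs : List String), Dom_directions_reduction dirs → Pre_directions_reduction dirs → Spec_directions_reduction dirs (directions_reduction dirs)

-- ===== LEMMAS AND PROOFS =====

-- a genuine direction token
def pvValid (d : String) : Prop := d = "NORTH" ∨ d = "SOUTH" ∨ d = "EAST" ∨ d = "WEST"

-- "b does not cancel a": the no-adjacent-cancellation relation; a reduced list is an IsChain.
def pvOK (a b : String) : Prop := b ≠ pvDIR.getD a ""

theorem pvOpp_opp {u : String} (hu : pvValid u) :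
    pvDIR.getD (pvDIR.getD u "") "" = u := by
  rcases hu with rfl | rfl | rfl | rfl <;> decide

theorem pvStep_nil (d : String) : pvStep [] d = [d] := rfl

theorem pvStep_mem {s : List String} {d x : String} (h : x ∈ pvStep s d) : x ∈ s ∨ x = d := by
  rcases s.eq_nil_or_concat with rfl | ⟨s', u, rfl⟩
  · rw [pvStep_nil] at h
    simp at h
    exact Or.inr h
  · simp only [List.concat_eq_append] at h ⊢
    simp only [pvStep, List.getLast?_concat] at h
    split at h
    · exact Or.inl (List.dropLast_subset _ h)
    · simp at h
      rcases h with h | h | h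
      · exact Or.inl (List.mem_append_left _ h)
      · exact Or.inl (by simp [h])
      · exact Or.inr h

theorem pvFoldl_mem : ∀ (l s : List String) (x : String),
    x ∈ List.foldl pvStep s l → x ∈ s ∨ x ∈ l := by
  intro l
  induction l with
  | nil => intro s x h; simp at h; exact Or.inl h
  | cons d ds ih =>
    intro s x h
    rcases ih _ x h with h' | h'
    · rcases pvStep_mem h' with h'' | rfl
      · exact Or.inl h''
      · simp
    · simp [h']

-- pushing through a reduced suffix only appends
theorem pvFoldl_of_chain : ∀ (r s : List String), List.IsChain pvOK (s ++ r) →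
    List.foldl pvStep s r = s ++ r := by
  intro r
  induction r with
  | nil => simp
  | cons t ts ih =>
    intro s h
    rcases s.eq_nil_or_concat with rfl | ⟨s', u, rfl⟩
    · simp only [List.foldl_cons, pvStep_nil]
      simpa using ih [t] (by simpa using h)
    · simp only [List.concat_eq_append] at h ⊢
      have hjunc : pvOK u t := by
        have := (List.isChain_append.mp h).2.2
        simpa using this u (by simp) t rfl
      have hstep : pvStep (s' ++ [u]) t = (s' ++ [u]) ++ [t] := by
        simp only [pvStep, List.getLast?_concat]
        rw [if_neg hjunc]
      rw [List.foldl_cons, hstep,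
        ih ((s' ++ [u]) ++ [t]) (by simpa using h)]
      simp

-- pvStep preserves reducedness
theorem pvStep_chain {s : List String} (hs : List.IsChain pvOK s) (d : String) :
    List.IsChain pvOK (pvStep s d) := by
  rcases s.eq_nil_or_concat with rfl | ⟨s', u, rfl⟩
  · simpa [pvStep_nil] using List.IsChain.singleton d
  · simp only [List.concat_eq_append] at hs ⊢
    by_cases hc : d = pvDIR.getD u ""
    · simp only [pvStep, List.getLast?_concat, hc, reduceIte]
      exact hs.prefix (by simpa using List.dropLast_prefix (s' ++ [u]))
    · have : pvStep (s' ++ [u]) d = (s' ++ [u]) ++ [d] := by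
        simp only [pvStep, List.getLast?_concat]
        rw [if_neg hc]
      rw [this]
      refine List.isChain_append.mpr ⟨hs, List.IsChain.singleton d, ?_⟩
      intro x hx y hy
      simp at hx hy
      subst hx hy
      exact hc

theorem pvFoldl_chain : ∀ (l s : List String), List.IsChain pvOK s →
    List.IsChain pvOK (List.foldl pvStep s l) := by
  intro l
  induction l with
  | nil => intro s hs; simpa using hs
  | cons d ds ih => intro s hs; exact ih _ (pvStep_chain hs d)

-- the cancellation law: pushing a valid token and then its opposite restores a reduced stack
theorem pvStep_cancel {S : List String} {u : String} (hS : List.IsChain pvOK S)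
    (hSv : ∀ x ∈ S, pvValid x) :
    pvStep (pvStep S u) (pvDIR.getD u "") = S := by
  rcases S.eq_nil_or_concat with rfl | ⟨S', w, rfl⟩
  · simp [pvStep]
  · simp only [List.concat_eq_append] at hS hSv ⊢
    by_cases hc : u = pvDIR.getD w ""
    · have hw : pvValid w := hSv w (by simp)
      have h1 : pvStep (S' ++ [w]) u = S' := by
        simp only [pvStep, List.getLast?_concat, if_pos hc, List.dropLast_concat]
      have h2 : pvDIR.getD u "" = w := by rw [hc, pvOpp_opp hw]
      rw [h1, h2]
      rcases S'.eq_nil_or_concat with rfl | ⟨T, v, rfl⟩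
      · simp [pvStep]
      · simp only [List.concat_eq_append] at hS ⊢
        have hvw : pvOK v w := by
          have := (List.isChain_append.mp hS).2.2
          simpa using this v (by simp) w rfl
        simp only [pvStep, List.getLast?_concat]
        rw [if_neg hvw]
    · have h1 : pvStep (S' ++ [w]) u = (S' ++ [w]) ++ [u] := by
        simp only [pvStep, List.getLast?_concat]
        rw [if_neg hc]
      rw [h1]
      simp only [pvStep, List.getLast?_concat, List.dropLast_concat]
      simp

-- unfolding equations for pvMerge
theorem pvMerge_cancel {left : List String} {t : String} (rs : List String)
    (hl : left.getLast? = some t) :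
    pvMerge left (pvDIR.getD t "" :: rs) = pvMerge left.dropLast rs := by
  rw [pvMerge.eq_def, hl]
  simp

theorem pvMerge_push {left : List String} {t r0 : String} (rs : List String)
    (hl : left.getLast? = some t) (hc : ¬ r0 = pvDIR.getD t "") :
    pvMerge left (r0 :: rs) = left ++ (r0 :: rs) := by
  rw [pvMerge.eq_def, hl]
  simp [hc]

theorem pvMerge_basic {left right : List String}
    (h1 : ∀ (t r0 : String) (rs : List String), left.getLast? = some t → right = r0 :: rs → False) :
    pvMerge left right = left ++ right := by
  rw [pvMerge.eq_def]
  rcases hgl : left.getLast? with _ | t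
  · rcases right with _ | ⟨r0, rs⟩ <;> simp
  · rcases right with _ | ⟨r0, rs⟩
    · simp
    · exact absurd (h1 t r0 rs hgl rfl) (by simp)

-- elements of a merge come from one of the two sides
theorem pvMerge_mem : ∀ (left right : List String) (x : String),
    x ∈ pvMerge left right → x ∈ left ∨ x ∈ right := by
  intro left right
  induction left, right using pvMerge.induct with
  | case1 left t rs hl ih =>
    intro x hx
    rw [pvMerge_cancel rs hl] at hx
    rcases ih x hx with h' | h'
    · exact Or.inl (List.dropLast_subset _ h')
    · simp [h']
  | case2 left t r0 rs hl hc =>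
    intro x hx
    rw [pvMerge_push rs hl hc] at hx
    simpa using hx
  | case3 left right h1 =>
    intro x hx
    rw [pvMerge_basic h1] at hx
    simpa using hx

-- a merge of two reduced words is reduced
theorem pvMerge_chain : ∀ (left right : List String), List.IsChain pvOK left →
    List.IsChain pvOK right → List.IsChain pvOK (pvMerge left right) := by
  intro left right
  induction left, right using pvMerge.induct with
  | case1 left t rs hl ih =>
    intro h1 h2
    rw [pvMerge_cancel rs hl]
    exact ih (h1.prefix (List.dropLast_prefix left)) h2.tail
  | case2 left t r0 rs hl hc =>
    intro h1 h2
    rw [pvMerge_push rs hl hc]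
    refine List.isChain_append.mpr ⟨h1, h2, ?_⟩
    intro x hx y hy
    rw [hl] at hx
    simp at hx hy
    subst hx hy
    exact hc
  | case3 left right h1 =>
    intro hA hB
    rw [pvMerge_basic h1]
    rcases hgl : left.getLast? with _ | t
    · have : left = [] := List.getLast?_eq_none_iff.mp hgl
      subst this
      simpa using hB
    · rcases right with _ | ⟨r0, rs⟩
      · simpa using hA
      · exact absurd (h1 t r0 rs hgl rfl) (by simp)

-- running the stack over a merge = running it over the left word, then the right word
theorem pvFoldl_merge : ∀ (left right s : List String),
    List.IsChain pvOK left → (∀ x ∈ left, pvValid x) →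
    List.IsChain pvOK s → (∀ x ∈ s, pvValid x) →
    List.foldl pvStep s (pvMerge left right) =
      List.foldl pvStep (List.foldl pvStep s left) right := by
  intro left right
  induction left, right using pvMerge.induct with
  | case1 left t rs hl ih =>
    intro s h1 h1v hs hsv
    obtain ⟨s', rfl⟩ := List.getLast?_eq_some_iff.mp hl
    have hfc : List.IsChain pvOK (List.foldl pvStep s s') := pvFoldl_chain s' s hs
    have hfv : ∀ x ∈ List.foldl pvStep s s', pvValid x := by
      intro x hx
      rcases pvFoldl_mem s' s x hx with h' | h'
      · exact hsv x h'
      · exact h1v x (by simp [h'])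
    simp only [List.dropLast_concat] at ih
    rw [pvMerge_cancel rs hl, List.dropLast_concat,
      ih s (h1.prefix (List.prefix_append s' [t]))
        (fun x hx => h1v x (List.mem_append_left _ hx)) hs hsv]
    simp only [List.foldl_append, List.foldl_cons, List.foldl_nil]
    rw [pvStep_cancel hfc hfv]
  | case2 left t r0 rs hl hc =>
    intro s _ _ _ _
    rw [pvMerge_push rs hl hc, List.foldl_append]
  | case3 left right h1 =>
    intro s _ _ _ _
    rw [pvMerge_basic h1, List.foldl_append]

-- pvGo yields a reduced word made of the input's tokens
theorem pvGo_mem : ∀ (l : List String) (x : String), x ∈ pvGo l → x ∈ l := by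
  intro l
  induction l using pvGo.induct with
  | case1 l h => intro x hx; rw [pvGo, dif_pos h] at hx; exact hx
  | case2 l h ih1 ih2 =>
    intro x hx
    rw [pvGo, dif_neg h] at hx
    rcases pvMerge_mem _ _ x hx with h' | h'
    · exact List.take_subset _ _ (ih1 x h')
    · exact List.drop_subset _ _ (ih2 x h')

theorem pvGo_chain : ∀ (l : List String), List.IsChain pvOK (pvGo l) := by
  intro l
  induction l using pvGo.induct with
  | case1 l h =>
    rw [pvGo, dif_pos h]
    match l, h with
    | [], _ => exact List.IsChain.nil
    | [d], _ => exact List.IsChain.singleton d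
  | case2 l h ih1 ih2 =>
    rw [pvGo, dif_neg h]
    exact pvMerge_chain _ _ ih1 ih2

-- main invariant: running any reduced, valid stack over pvGo l = running it over l itself
theorem pvGo_foldl : ∀ (l : List String), (∀ d ∈ l.dropLast, pvValid d) →
    ∀ (s : List String), List.IsChain pvOK s → (∀ x ∈ s, pvValid x) →
    List.foldl pvStep s (pvGo l) = List.foldl pvStep s l := by
  intro l
  induction l using pvGo.induct with
  | case1 l h => intro _ s _ _; rw [pvGo, dif_pos h]
  | case2 l h ih1 ih2 =>
    intro hl s hs hsv
    have hmid : l.length / 2 ≤ l.length - 1 := by omega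
    have hl1 : ∀ d ∈ l.take (l.length / 2), pvValid d := by
      intro d hd
      exact hl d (by
        rw [List.dropLast_eq_take]
        exact List.take_subset_take_left l hmid hd)
    have hl1' : ∀ d ∈ (l.take (l.length / 2)).dropLast, pvValid d :=
      fun d hd => hl1 d (List.dropLast_subset _ hd)
    have hl2 : ∀ d ∈ (l.drop (l.length / 2)).dropLast, pvValid d := by
      intro d hd
      rw [List.dropLast_eq_take, List.length_drop, List.take_drop] at hd
      have harith : l.length / 2 + (l.length - l.length / 2 - 1) = l.length - 1 := by omega
      rw [harith] at hd
      exact hl d (by rw [List.dropLast_eq_take]; exact List.drop_subset _ _ hd)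
    have hg1c : List.IsChain pvOK (pvGo (l.take (l.length / 2))) := pvGo_chain _
    have hg1v : ∀ x ∈ pvGo (l.take (l.length / 2)), pvValid x :=
      fun x hx => hl1 x (pvGo_mem _ x hx)
    rw [pvGo, dif_neg h,
      pvFoldl_merge _ _ s hg1c hg1v hs hsv,
      ih1 hl1' s hs hsv,
      ih2 hl2 (List.foldl pvStep s (l.take (l.length / 2)))
        (pvFoldl_chain _ s hs)
        (by
          intro x hx
          rcases pvFoldl_mem _ s x hx with h' | h'
          · exact hsv x h'
          · exact hl1 x h'),
      ← List.foldl_append, List.take_append_drop]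

-- A's port, unfolded to the same stack run from the empty stack
theorem pvA_eq_foldl (dirs : List String) :
    directions_reduction dirs = List.foldl pvStep [] dirs := by
  cases dirs with
  | nil => rfl
  | cons d0 rest => simp [directions_reduction, pvStep_nil]

-- ===== VERDICT (by name: the statement is the Claim_ definition above) =====
theorem directions_reduction_spec : Claim_equal_directions_reduction := by
  intro dirs _ hpre
  unfold Spec_directions_reduction directions_reduction_alt
  rw [pvA_eq_foldl,
    ← pvGo_foldl dirs hpre [] List.IsChain.nil (by simp),
    pvFoldl_of_chain _ [] (by simpa using pvGo_chain dirs)]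
  simp
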